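-- pv_equiv track=rewrite | github.com/unstoppablegiggle/BINF6310GROUPPROJECT | Scripts/project.py | count_gaps
-- ===== SOURCE A (Python) =====
-- def count_gaps(x):
--   gaps=0
--   gapflag=False
--   for k in x:
--     if k == '-' and gapflag==False:
--       gapflag=True
--       gaps+=1
--     elif k != '-' and gapflag==True:
--       gapflag=False
--   return gaps
-- ===== SOURCE B (Python) =====
-- def count_gaps(x):
--     masked = ''.join(c if c == '-' else ' ' for c in x)
--     return len(masked.split())
-- ===== Notes on version B (the rewrite author's own statement) =====
-- stated objective: idiomatic
-- what changed: Replaces the per-character gapflag state machine with a staged pipeline: mask every non-dash character to a space, then count the whitespace-separated tokens of the masked string with str.split().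
import Mathlib
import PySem

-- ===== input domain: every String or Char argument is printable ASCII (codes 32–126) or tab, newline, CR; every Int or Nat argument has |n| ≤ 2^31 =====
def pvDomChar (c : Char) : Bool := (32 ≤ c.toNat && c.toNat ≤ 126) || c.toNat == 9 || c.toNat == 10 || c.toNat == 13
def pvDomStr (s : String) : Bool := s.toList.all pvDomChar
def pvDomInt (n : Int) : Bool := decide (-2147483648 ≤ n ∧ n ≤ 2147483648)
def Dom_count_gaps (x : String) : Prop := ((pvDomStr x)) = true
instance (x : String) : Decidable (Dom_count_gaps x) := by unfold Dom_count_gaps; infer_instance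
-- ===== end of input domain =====

-- B replaces A's gapflag state machine by a staged pipeline: mask every non-dash character
-- to a space, then count the whitespace-separated tokens with str.split() (objective: idiomatic).

-- ===== PORT A =====
-- A's loop: state (gaps, gapflag), branches in A's order.
def count_gaps (x : String) : Int :=
  (x.toList.foldl
    (fun (s : Int × Bool) k =>
      if k == '-' && s.2 == false then (s.1 + 1, true)
      else if k != '-' && s.2 == true then (s.1, false)
      else s)
    (0, false)).1

-- ===== PORT B =====
-- masked = ''.join(c if c == '-' else ' ' for c in x); return len(masked.split())
def count_gaps_alt (x : String) : Int :=
  Int.ofNat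
    ((PySem.Str.split₀
        (String.ofList (x.toList.map (fun c => if c = '-' then c else ' ')))).length)

-- ===== PRECONDITION & SPEC =====
def Spec_count_gaps (x : String) (out : Int) : Prop := out = count_gaps_alt x
instance (x : String) (out : Int) : Decidable (Spec_count_gaps x out) := by unfold Spec_count_gaps; infer_instance

-- ===== CLAIM =====
def Claim_equal_count_gaps : Prop := ∀ (x : String), Dom_count_gaps x → Spec_count_gaps x (count_gaps x)

-- ===== LEMMAS AND PROOFS =====

-- A's loop body, named for the proofs.
def pvStep (s : Int × Bool) (k : Char) : Int × Bool :=
  if k == '-' && s.2 == false then (s.1 + 1, true)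
  else if k != '-' && s.2 == true then (s.1, false)
  else s

-- the mask applied by B
def pvMask (c : Char) : Char := if c = '-' then c else ' '

theorem pvStep_shift (g : Int) (b : Bool) (c : Char) :
    pvStep (g, b) c = ((pvStep (0, b) c).1 + g, (pvStep (0, b) c).2) := by
  simp only [pvStep]
  by_cases h : c = '-' <;> cases b <;> (simp [h]; try ring)

theorem pvFoldl_shift (l : List Char) : ∀ (g : Int) (b : Bool),
    (l.foldl pvStep (g, b)).1 = g + (l.foldl pvStep (0, b)).1 := by
  induction l with
  | nil => intro g b; simp
  | cons c rest ih =>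
    intro g b
    simp only [List.foldl_cons]
    rw [pvStep_shift g b c, ih, ih ((pvStep (0, b) c).1)]
    ring

-- main invariant: split₀.go over the masked list vs A's fold from either flag state
theorem pvMain (l : List Char) : ∀ (acc : List (List Char)),
    (((PySem.Chars.split₀.go (l.map pvMask) [] acc).length : Int)
        = acc.length + (l.foldl pvStep (0, false)).1)
    ∧ (∀ cur : List Char, cur ≠ [] →
        ((PySem.Chars.split₀.go (l.map pvMask) cur acc).length : Int)
          = acc.length + 1 + (l.foldl pvStep (0, true)).1) := by
  induction l with
  | nil =>
    intro acc
    constructor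
    · simp [PySem.Chars.split₀.go]
    · intro cur hcur
      simp [PySem.Chars.split₀.go, List.isEmpty_iff, hcur]
  | cons c rest ih =>
    intro acc
    have hih := ih acc
    constructor
    · by_cases h : c = '-'
      · subst h
        show ((PySem.Chars.split₀.go ('-' :: rest.map pvMask) [] acc).length : Int) = _
        rw [show PySem.Chars.split₀.go ('-' :: rest.map pvMask) [] acc
              = PySem.Chars.split₀.go (rest.map pvMask) ['-'] acc from by
            simp [PySem.Chars.split₀.go, PySem.Chars.isspace]]
        rw [(hih).2 ['-'] (by simp)]
        rw [List.foldl_cons, show pvStep (0, false) '-' = (1, true) from by simp [pvStep],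
          pvFoldl_shift rest 1 true]
        ring
      · show ((PySem.Chars.split₀.go (pvMask c :: rest.map pvMask) [] acc).length : Int) = _
        rw [show pvMask c = ' ' from by simp [pvMask, h]]
        rw [show PySem.Chars.split₀.go (' ' :: rest.map pvMask) [] acc
              = PySem.Chars.split₀.go (rest.map pvMask) [] acc from by
            simp [PySem.Chars.split₀.go, PySem.Chars.isspace]]
        rw [(hih).1]
        rw [List.foldl_cons, show pvStep (0, false) c = (0, false) from by simp [pvStep, h]]
    · intro cur hcur
      by_cases h : c = '-'
      · subst h
        show ((PySem.Chars.split₀.go ('-' :: rest.map pvMask) cur acc).length : Int) = _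
        rw [show PySem.Chars.split₀.go ('-' :: rest.map pvMask) cur acc
              = PySem.Chars.split₀.go (rest.map pvMask) ('-' :: cur) acc from by
            simp [PySem.Chars.split₀.go, PySem.Chars.isspace]]
        rw [(hih).2 ('-' :: cur) (by simp)]
        rw [List.foldl_cons, show pvStep (0, true) '-' = (0, true) from by simp [pvStep]]
      · show ((PySem.Chars.split₀.go (pvMask c :: rest.map pvMask) cur acc).length : Int) = _
        rw [show pvMask c = ' ' from by simp [pvMask, h]]
        rw [show PySem.Chars.split₀.go (' ' :: rest.map pvMask) cur acc
              = PySem.Chars.split₀.go (rest.map pvMask) [] (cur.reverse :: acc) from by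
            simp [PySem.Chars.split₀.go, PySem.Chars.isspace, List.isEmpty_iff, hcur]]
        rw [(ih (cur.reverse :: acc)).1]
        rw [List.foldl_cons, show pvStep (0, true) c = (0, false) from by simp [pvStep, h]]
        simp

-- ===== VERDICT =====
theorem count_gaps_spec : Claim_equal_count_gaps := by
  intro x _
  unfold Spec_count_gaps count_gaps_alt
  show (x.toList.foldl pvStep (0, false)).1 = _
  have hmask : (String.ofList (x.toList.map (fun c => if c = '-' then c else ' '))).toList
      = x.toList.map pvMask := by simp [pvMask]
  simp only [PySem.Str.split₀, PySem.Chars.split₀, List.length_map, hmask]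
  have h := (pvMain x.toList []).1
  simp only [List.length_nil, Nat.cast_zero, Int.ofNat_eq_natCast] at h ⊢
  omega
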